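-- pv_equiv track=rewrite | github.com/XieZikai/RetrievalSympfn | src/generator.py | split_at_value
-- ===== SOURCE A (Python) =====
-- def split_at_value(lst, value):  # 按指定值分割列表
--     indices = [i for i, x in enumerate(lst) if x == value]  # 获取指定值的索引
--     res = []
--     for start, end in zip(  # 按索引分割列表
--             [0, *[i + 1 for i in indices]], [*[i - 1 for i in indices], len(lst)]
--     ):
--         res.append(lst[start: end + 1])
--     return res
-- ===== SOURCE B (Python) =====
-- def split_at_value(lst, value):
--     res = []
--     cur = []
--     for x in lst:
--         if x == value:
--             res.append(cur)
--             cur = []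
--         else:
--             cur.append(x)
--     res.append(cur)
--     return res
-- ===== Notes on version B (the rewrite author's own statement) =====
-- stated objective: simpler
-- what changed: Replaced A's two-phase approach (collect all indices of value via enumerate, then slice out boundary-paired segments from a zipped start/end list) with a single accumulating pass that appends to the current segment and flushes it on each delimiter.
import Mathlib
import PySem

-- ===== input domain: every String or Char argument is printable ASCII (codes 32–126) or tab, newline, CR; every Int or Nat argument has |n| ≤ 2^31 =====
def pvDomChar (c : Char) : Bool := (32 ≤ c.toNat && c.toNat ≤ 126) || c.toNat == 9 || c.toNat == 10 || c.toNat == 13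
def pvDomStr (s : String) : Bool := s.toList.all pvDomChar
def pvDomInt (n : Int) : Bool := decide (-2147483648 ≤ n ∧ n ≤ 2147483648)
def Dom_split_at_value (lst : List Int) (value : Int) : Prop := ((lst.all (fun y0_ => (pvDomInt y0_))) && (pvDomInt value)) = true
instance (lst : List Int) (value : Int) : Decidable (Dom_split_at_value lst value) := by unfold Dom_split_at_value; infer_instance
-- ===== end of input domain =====

-- B replaces A's two-phase index-gathering + slicing with a single accumulating pass (objective: simpler).

-- ===== PORT A =====
def split_at_value (lst : List Int) (value : Int) : List (List Int) :=
  let indices : List Int :=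
    ((PySem.List.enumerate lst).filter (fun p => p.2 == value)).map (fun p => p.1)
  (((0 : Int) :: indices.map (· + 1)).zip (indices.map (· - 1) ++ [((lst.length : Int))])).foldl
    (fun res p => res ++ [PySem.List.slice lst (some p.1) (some (p.2 + 1))]) []

-- ===== PORT B =====
def altLoop (value : Int) : List Int → List (List Int) → List Int → List (List Int)
  | [], res, cur => res ++ [cur]
  | x :: xs, res, cur =>
      if x = value then altLoop value xs (res ++ [cur]) []
      else altLoop value xs res (cur ++ [x])

def split_at_value_alt (lst : List Int) (value : Int) : List (List Int) :=
  altLoop value lst [] []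

-- ===== PRECONDITION & SPEC =====
def Spec_split_at_value (lst : List Int) (value : Int) (out : List (List Int)) : Prop := out = split_at_value_alt lst value
instance (lst : List Int) (value : Int) (out : List (List Int)) : Decidable (Spec_split_at_value lst value out) := by unfold Spec_split_at_value; infer_instance

-- ===== CLAIM (what is proved, stated in full; the proofs are below) =====
def Claim_equal_split_at_value : Prop := ∀ (lst : List Int) (value : Int), Dom_split_at_value lst value → Spec_split_at_value lst value (split_at_value lst value)

-- ===== LEMMAS AND PROOFS =====

-- recursive characterisation of the split (shared reference point of the two proofs)
def specS (value : Int) : List Int → List (List Int)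
  | [] => [[]]
  | x :: xs =>
      if x = value then [] :: specS value xs
      else match specS value xs with
        | [] => [[x]]
        | h :: t => (x :: h) :: t

-- recursive form of A's index list
def idxF (value : Int) : List Int → List Int
  | [] => []
  | x :: xs => if x = value then 0 :: (idxF value xs).map (· + 1) else (idxF value xs).map (· + 1)

-- recursive form of A's boundary-paired slice list
def segsR (lst : List Int) (start : Int) : List Int → List (List Int)
  | [] => [PySem.List.slice lst (some start) (some ((lst.length : Int) + 1))]
  | j :: J => PySem.List.slice lst (some start) (some j) :: segsR lst (j + 1) J

theorem specS_ne_nil (value : Int) (xs : List Int) : specS value xs ≠ [] := by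
  cases xs with
  | nil => simp [specS]
  | cons x xs =>
      simp only [specS]
      split_ifs <;> [simp; skip]
      cases specS value xs <;> simp

theorem idxF_nonneg (value : Int) (xs : List Int) : ∀ j ∈ idxF value xs, 0 ≤ j := by
  induction xs with
  | nil => simp [idxF]
  | cons x xs ih =>
      intro j hj
      simp only [idxF] at hj
      split_ifs at hj with h
      · simp only [List.mem_cons, List.mem_map] at hj
        rcases hj with rfl | ⟨j', hj', rfl⟩
        · exact le_refl 0
        · have := ih j' hj'; omega
      · simp only [List.mem_map] at hj
        obtain ⟨j', hj', rfl⟩ := hj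
        have := ih j' hj'; omega


theorem enum_idx (value : Int) (xs : List Int) (s : Int) :
    (((PySem.List.enumerate xs s).filter (fun p => p.2 == value)).map (fun p => p.1))
      = (idxF value xs).map (· + s) := by
  induction xs generalizing s with
  | nil => simp [PySem.List.enumerate_nil, idxF]
  | cons x xs ih =>
      rw [PySem.List.enumerate_cons]
      simp only [idxF]
      by_cases h : x = value
      · rw [if_pos h, List.filter_cons_of_pos (by simp [h])]
        simp only [List.map_cons, List.map_map]
        rw [ih (s + 1)]
        congr 1
        · simp
        · apply List.map_congr_left; intro j _; simp [Function.comp]; omega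
      · rw [if_neg h, List.filter_cons_of_neg (by simp [h])]
        rw [ih (s + 1), List.map_map]
        apply List.map_congr_left; intro j _; simp [Function.comp]; omega


theorem slice_shift (x : Int) (xs : List Int) (a b : Int) (ha : 0 ≤ a) (hb : 0 ≤ b) :
    PySem.List.slice (x :: xs) (some (a + 1)) (some (b + 1)) = PySem.List.slice xs (some a) (some b) := by
  rw [PySem.List.slice_toNat _ (by omega) (by omega), PySem.List.slice_toNat _ ha hb]
  have h1 : (a + 1).toNat = a.toNat + 1 := by omega
  have h2 : (b + 1).toNat = b.toNat + 1 := by omega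
  rw [h1, h2]
  simp [List.drop_succ_cons]


theorem segsR_shift (x : Int) (xs : List Int) (J : List Int) (s : Int)
    (hJ : ∀ j ∈ J, 0 ≤ j) (hs : 0 ≤ s) :
    segsR (x :: xs) (s + 1) (J.map (· + 1)) = segsR xs s J := by
  induction J generalizing s with
  | nil =>
      simp only [List.map_nil, segsR]
      have hlen : ((x :: xs).length : Int) + 1 = ((xs.length : Int) + 1) + 1 := by
        push_cast [List.length_cons]; ring
      rw [hlen, slice_shift x xs s ((xs.length : Int) + 1) hs (by positivity)]
  | cons j J ih =>
      simp only [List.map_cons, segsR]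
      have hj : 0 ≤ j := hJ j (List.mem_cons_self)
      rw [slice_shift x xs s j hs hj,
        ih (j + 1) (fun j' hj' => hJ j' (List.mem_cons_of_mem _ hj')) (by omega)]


theorem slice_zero_take (xs : List Int) (b : Int) (hb : 0 ≤ b) :
    PySem.List.slice xs (some 0) (some b) = xs.take b.toNat := by
  rw [PySem.List.slice_zero_start, PySem.List.slice_to _ hb]

theorem segs_spec (value : Int) (lst : List Int) :
    segsR lst 0 (idxF value lst) = specS value lst := by
  induction lst with
  | nil => simp [idxF, segsR, specS, PySem.List.slice_zero_start, PySem.List.slice_to]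
  | cons x xs ih =>
      by_cases h : x = value
      · simp only [idxF, if_pos h, segsR, specS]
        have h0 : PySem.List.slice (x :: xs) (some 0) (some 0) = ([] : List Int) := by
          rw [slice_zero_take _ 0 le_rfl]; simp
        rw [h0, segsR_shift x xs (idxF value xs) 0 (idxF_nonneg value xs) le_rfl, ih]
      · simp only [specS, if_neg h]
        cases hJ : idxF value xs with
        | nil =>
            rw [← ih, hJ]
            simp only [idxF, if_neg h, hJ, List.map_nil, segsR]
            rw [slice_zero_take _ _ (by positivity), slice_zero_take _ _ (by positivity)]
            have h1 : (((x :: xs).length : Int) + 1).toNat = xs.length + 2 := by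
              simp only [List.length_cons]; omega
            have h2 : (((xs).length : Int) + 1).toNat = xs.length + 1 := by omega
            rw [h1, h2]
            simp [List.take_of_length_le]
        | cons j J =>
            have hj : 0 ≤ j := idxF_nonneg value xs j (by rw [hJ]; exact List.mem_cons_self)
            have hJ' : ∀ j' ∈ J, 0 ≤ j' := fun j' hj' =>
              idxF_nonneg value xs j' (by rw [hJ]; exact List.mem_cons_of_mem _ hj')
            rw [← ih, hJ]
            simp only [idxF, if_neg h, hJ, List.map_cons, segsR]
            rw [segsR_shift x xs J (j + 1) hJ' (by omega)]
            rw [slice_zero_take _ _ (by omega), slice_zero_take _ _ hj]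
            have h3 : (j + 1).toNat = j.toNat + 1 := by omega
            rw [h3, List.take_succ_cons]


theorem zip_segs (lst : List Int) (J : List Int) (start : Int) :
    ((start :: J.map (· + 1)).zip (J.map (· - 1) ++ [((lst.length : Int))])).foldl
      (fun res p => res ++ [PySem.List.slice lst (some p.1) (some (p.2 + 1))]) []
      = segsR lst start J := by
  rw [PySem.List.foldl_append_singleton_eq_map]
  simp only [List.nil_append]
  induction J generalizing start with
  | nil => simp [segsR]
  | cons j J ih =>
      simp only [List.map_cons, List.cons_append, List.zip_cons_cons, List.map_cons, segsR]
      rw [show j - 1 + 1 = j by ring, ih (j + 1)]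


theorem altLoop_spec (value : Int) (xs : List Int) (res : List (List Int)) (cur : List Int) :
    altLoop value xs res cur
      = res ++ (match specS value xs with
                | [] => [cur]
                | h :: t => (cur ++ h) :: t) := by
  induction xs generalizing res cur with
  | nil => simp [altLoop, specS]
  | cons x xs ih =>
      by_cases h : x = value
      · simp only [altLoop, if_pos h, specS]
        rw [ih]
        cases hS : specS value xs with
        | nil => exact absurd hS (specS_ne_nil value xs)
        | cons hd tl => simp
      · simp only [altLoop, if_neg h, specS]
        rw [ih]
        cases hS : specS value xs with
        | nil => exact absurd hS (specS_ne_nil value xs)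
        | cons hd tl => simp

-- ===== VERDICT (by name: the statement is the Claim_ definition above) =====
theorem split_at_value_spec : Claim_equal_split_at_value := by
  intro lst value _
  unfold Spec_split_at_value split_at_value split_at_value_alt
  rw [enum_idx value lst 0]
  have hmap : (idxF value lst).map (· + 0) = idxF value lst := by
    simp
  rw [hmap, zip_segs lst (idxF value lst) 0, segs_spec value lst, altLoop_spec]
  cases hS : specS value lst with
  | nil => exact absurd hS (specS_ne_nil value lst)
  | cons hd tl => simp
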